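-- pv_equiv track=rewrite | github.com/bmoretz/Algorithms | Python/ch_04/creativity/c_4.18.py | has_more
-- ===== SOURCE A (Python) =====
-- def has_more(s):
--     if len(s) == 0:
--         return 0
--     else:
--         if s[0] in ['a', 'e', 'i', 'o', 'u']:
--             return 1 + has_more(s[1:])
--         else:
--             return -1 + has_more(s[1:])
-- ===== SOURCE B (Python) =====
-- def has_more(s):
--     total = 0
--     for c in s:
--         if c in ('a', 'e', 'i', 'o', 'u'):
--             total += 1
--         else:
--             total -= 1
--     return total
-- ===== Notes on version B (the rewrite author's own statement) =====
-- stated objective: simpler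
-- what changed: Replaces the O(n^2) recursion with repeated s[1:] string slicing by a single flat loop over the characters accumulating the running total.
import Mathlib
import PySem

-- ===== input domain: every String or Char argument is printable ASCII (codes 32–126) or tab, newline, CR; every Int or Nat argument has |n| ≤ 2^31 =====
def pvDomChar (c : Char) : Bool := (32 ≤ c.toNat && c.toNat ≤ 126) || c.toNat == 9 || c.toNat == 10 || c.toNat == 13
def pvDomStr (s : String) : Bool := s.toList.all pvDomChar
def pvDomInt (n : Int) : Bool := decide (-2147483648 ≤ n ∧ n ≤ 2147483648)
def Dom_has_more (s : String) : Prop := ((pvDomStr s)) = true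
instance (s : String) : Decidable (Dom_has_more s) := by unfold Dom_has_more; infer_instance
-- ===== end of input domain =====

-- B replaces A's recursion with repeated s[1:] slicing by a single flat loop with an accumulator.

-- ===== PORT A =====
-- A's recursion on the string: empty → 0; vowel head → 1 + recurse on tail; else -1 + recurse on tail.
def hasMoreRec : List Char → Int
  | [] => 0
  | c :: rest =>
      if c ∈ ['a', 'e', 'i', 'o', 'u'] then 1 + hasMoreRec rest
      else -1 + hasMoreRec rest

def has_more (s : String) : Int := hasMoreRec s.toList

-- ===== PORT B =====
-- B's flat loop: total starts at 0, +1 for vowels, -1 otherwise.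
def has_more_alt (s : String) : Int :=
  s.toList.foldl (fun total c => if c ∈ ['a', 'e', 'i', 'o', 'u'] then total + 1 else total - 1) 0

-- ===== PRECONDITION & SPEC =====
def Spec_has_more (s : String) (out : Int) : Prop := out = has_more_alt s
instance (s : String) (out : Int) : Decidable (Spec_has_more s out) := by unfold Spec_has_more; infer_instance

-- ===== CLAIM (what is proved, stated in full; the proofs are below) =====
def Claim_equal_has_more : Prop := ∀ (s : String), Dom_has_more s → Spec_has_more s (has_more s)

-- ===== LEMMAS AND PROOFS =====
theorem foldl_eq_rec (l : List Char) (t : Int) :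
    l.foldl (fun total c => if c ∈ ['a', 'e', 'i', 'o', 'u'] then total + 1 else total - 1) t
      = t + hasMoreRec l := by
  induction l generalizing t with
  | nil => simp [hasMoreRec]
  | cons c rest ih =>
      simp only [List.foldl, hasMoreRec]
      split <;> rw [ih] <;> ring

-- ===== VERDICT (by name: the statement is the Claim_ definition above) =====
theorem has_more_spec : Claim_equal_has_more := by
  intro s _
  unfold Spec_has_more has_more has_more_alt
  rw [foldl_eq_rec]
  ring
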